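-- pv_equiv track=rewrite | github.com/carson-hellman/leetcode | Easy/1550.py | threeConsecutiveOdds
-- ===== SOURCE A (Python) =====
-- from typing import List
--
-- def threeConsecutiveOdds(arr: List[int]) -> bool:
--     consec = 0
--     for item in arr:
--         if item % 2 != 0:
--             consec += 1
--         else:
--             consec = 0
--
--         if consec == 3:
--             return True
--
--     return False
-- ===== SOURCE B (Python) =====
-- from typing import List
--
-- def threeConsecutiveOdds(arr: List[int]) -> bool:
--     return any(a % 2 and b % 2 and c % 2
--                for a, b, c in zip(arr, arr[1:], arr[2:]))
-- ===== Notes on version B (the rewrite author's own statement) =====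
-- stated objective: idiomatic
-- what changed: Replaces the running-streak counter with a stateless sliding-window test: any() over zip(arr, arr[1:], arr[2:]) checks each length-3 window directly.
import Mathlib
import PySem

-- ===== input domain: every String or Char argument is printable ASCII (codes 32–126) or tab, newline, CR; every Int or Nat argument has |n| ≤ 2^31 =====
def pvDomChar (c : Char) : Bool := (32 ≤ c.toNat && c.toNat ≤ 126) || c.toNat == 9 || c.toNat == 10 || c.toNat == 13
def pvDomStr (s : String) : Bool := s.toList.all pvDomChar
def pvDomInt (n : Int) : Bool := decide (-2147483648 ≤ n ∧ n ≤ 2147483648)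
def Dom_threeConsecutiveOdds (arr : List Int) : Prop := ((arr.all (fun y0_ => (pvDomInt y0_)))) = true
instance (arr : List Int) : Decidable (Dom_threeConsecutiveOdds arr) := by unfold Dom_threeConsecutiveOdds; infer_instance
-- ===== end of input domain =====

-- B replaces A's running-streak counter with a stateless sliding-window test (idiomatic zip/any).
-- ===== PORT A =====
-- A's for-loop with early return, as structural recursion over the list carrying the counter
def pvLoopA : List Int → Int → Bool
  | [], _ => false
  | item :: rest, consec =>
    let c : Int := if PySem.Int.mod item 2 ≠ 0 then consec + 1 else 0
    if c = 3 then true else pvLoopA rest c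

def threeConsecutiveOdds (arr : List Int) : Bool := pvLoopA arr 0

-- ===== PORT B =====
-- any(a % 2 and b % 2 and c % 2 for a, b, c in zip(arr, arr[1:], arr[2:]))
def threeConsecutiveOdds_alt (arr : List Int) : Bool :=
  ((arr.zip (PySem.List.slice arr (some 1) none)).zip (PySem.List.slice arr (some 2) none)).any
    (fun p => decide (PySem.Int.mod p.1.1 2 ≠ 0) && decide (PySem.Int.mod p.1.2 2 ≠ 0) &&
              decide (PySem.Int.mod p.2 2 ≠ 0))

-- ===== PRECONDITION & SPEC =====
def Spec_threeConsecutiveOdds (arr : List Int) (out : Bool) : Prop := out = threeConsecutiveOdds_alt arr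
instance (arr : List Int) (out : Bool) : Decidable (Spec_threeConsecutiveOdds arr out) := by unfold Spec_threeConsecutiveOdds; infer_instance

-- ===== CLAIM (what is proved, stated in full; the proofs are below) =====
def Claim_equal_threeConsecutiveOdds : Prop := ∀ (arr : List Int), Dom_threeConsecutiveOdds arr → Spec_threeConsecutiveOdds arr (threeConsecutiveOdds arr)

-- ===== LEMMAS AND PROOFS =====

-- abbreviation for the odd test both programs use
def pvOdd (x : Int) : Bool := decide (PySem.Int.mod x 2 ≠ 0)

-- recursive characterisation of B's window test, used only in the proofs
def pvW : List Int → Bool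
  | a :: b :: c :: t => (pvOdd a && pvOdd b && pvOdd c) || pvW (b :: c :: t)
  | _ => false

-- first element exists and is odd
def pvH1 : List Int → Bool
  | x :: _ => pvOdd x
  | _ => false

-- first two elements exist and are odd
def pvH2 : List Int → Bool
  | x :: y :: _ => pvOdd x && pvOdd y
  | _ => false

lemma alt_eq (xs : List Int) : threeConsecutiveOdds_alt xs = pvW xs := by
  induction xs using pvW.induct with
  | case1 a b c t ih =>
    unfold threeConsecutiveOdds_alt at ih ⊢
    rw [PySem.List.slice_from _ (by norm_num : (0:Int) ≤ 1),
        PySem.List.slice_from _ (by norm_num : (0:Int) ≤ 2)] at ih ⊢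
    simp only [Int.toNat_one, List.drop_succ_cons,
      show (2:Int).toNat = 2 from rfl] at ih ⊢
    rw [pvW, ← ih]
    simp [List.zip, pvOdd, Bool.and_assoc]
  | case2 xs h =>
    match xs with
    | [] => rfl
    | [a] => rfl
    | [a, b] =>
      unfold threeConsecutiveOdds_alt
      rw [PySem.List.slice_from _ (by norm_num : (0:Int) ≤ 1),
          PySem.List.slice_from _ (by norm_num : (0:Int) ≤ 2)]
      rfl
    | a :: b :: c :: t => exact absurd rfl (h a b c t)

lemma pvW_cons_even (a : Int) (t : List Int) (h : pvOdd a = false) :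
    pvW (a :: t) = pvW t := by
  match t with
  | [] => rfl
  | [b] => rfl
  | b :: c :: t' => rw [pvW, h]; simp

lemma pvH2_cons_even (x : Int) (t : List Int) (h : pvOdd x = false) :
    pvH2 (x :: t) = false := by
  cases t <;> simp [pvH2, h]

-- main invariant: the counter states 0, 1, 2 of A's loop, characterised via the window test
lemma loop_inv : ∀ (xs : List Int),
    pvLoopA xs 0 = pvW xs ∧
    pvLoopA xs 1 = (pvH2 xs || pvW xs) ∧
    pvLoopA xs 2 = (pvH1 xs || pvW xs) := by
  intro xs
  induction xs with
  | nil => exact ⟨rfl, rfl, rfl⟩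
  | cons x t ih =>
    obtain ⟨ih0, ih1, ih2⟩ := ih
    by_cases hx : PySem.Int.mod x 2 ≠ 0
    · have hxo : pvOdd x = true := decide_eq_true hx
      refine ⟨?_, ?_, ?_⟩
      · -- counter 0, odd head → counter 1 on tail
        show pvLoopA (x :: t) 0 = _
        simp only [pvLoopA, if_pos hx]
        norm_num
        rw [ih1]
        match t with
        | [] => rfl
        | [b] => cases hb : pvOdd b <;> simp [pvH2, pvW]
        | b :: c :: t' =>
          rw [show pvW (x :: b :: c :: t') =
                ((pvOdd x && pvOdd b && pvOdd c) || pvW (b :: c :: t')) from rfl, hxo]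
          simp [pvH2]
      · -- counter 1, odd head → counter 2 on tail
        show pvLoopA (x :: t) 1 = _
        simp only [pvLoopA, if_pos hx]
        norm_num
        rw [ih2]
        match t with
        | [] => rfl
        | [b] => cases hb : pvOdd b <;> simp [pvH1, pvH2, pvW, hxo, hb]
        | b :: c :: t' =>
          rw [pvW, hxo]
          simp only [pvH1, pvH2, hxo, Bool.true_and]
          cases pvOdd b <;> cases pvOdd c <;> simp
      · -- counter 2, odd head → streak of 3 → True
        show pvLoopA (x :: t) 2 = _
        simp only [pvLoopA, if_pos hx]
        norm_num
        simp [pvH1, hxo]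
    · have hxo : pvOdd x = false := decide_eq_false hx
      refine ⟨?_, ?_, ?_⟩
      · show pvLoopA (x :: t) 0 = _
        simp only [pvLoopA, if_neg hx]
        norm_num
        rw [ih0, pvW_cons_even x t hxo]
      · show pvLoopA (x :: t) 1 = _
        simp only [pvLoopA, if_neg hx]
        norm_num
        rw [ih0, pvW_cons_even x t hxo, pvH2_cons_even x t hxo]
        simp
      · show pvLoopA (x :: t) 2 = _
        simp only [pvLoopA, if_neg hx]
        norm_num
        rw [ih0, pvW_cons_even x t hxo]
        simp [pvH1, hxo]

-- ===== VERDICT (by name: the statement is the Claim_ definition above) =====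
theorem threeConsecutiveOdds_spec : Claim_equal_threeConsecutiveOdds := by
  intro arr _
  unfold Spec_threeConsecutiveOdds threeConsecutiveOdds
  rw [alt_eq]
  exact (loop_inv arr).1
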